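-- pv_equiv track=rewrite | github.com/mordecaai/gaucho_guardian | schedule_optimizer.py | check_schedule_conflicts_fast
-- ===== SOURCE A (Python) =====
-- from typing import List, Dict, Optional, Tuple
--
-- _time_cache: Dict[str, int] = {}
--
-- def time_to_minutes(time_str: str) -> int:
--     """Convert time string (HH:MM) to minutes since midnight (memoized)"""
--     if not time_str:
--         return 0
--     if time_str in _time_cache:
--         return _time_cache[time_str]
--     parts = time_str.split(':')
--     if len(parts) != 2:
--         _time_cache[time_str] = 0
--         return 0
--     try:
--         result = int(parts[0]) * 60 + int(parts[1])
--         _time_cache[time_str] = result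
--         return result
--     except (ValueError, TypeError):
--         _time_cache[time_str] = 0
--         return 0
--
-- def check_schedule_conflicts_fast(schedule_times: List[Dict]) -> bool:
--     """
--     Optimized conflict checking using day-based grouping.
--     Returns True if there are conflicts, False otherwise.
--
--     Groups times by day first, then checks for overlaps within each day.
--     This is much faster than checking all pairs across all days.
--     """
--     if len(schedule_times) < 2:
--         return False
--
--     # Group times by day for faster conflict checking
--     day_groups: Dict[str, List[Tuple[int, int]]] = {}
--
--     for time_info in schedule_times:
--         days = time_info.get("days", "").replace(" ", "")
--         start_time = time_to_minutes(time_info.get("startTime", ""))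
--         end_time = time_to_minutes(time_info.get("endTime", ""))
--
--         if not start_time or not end_time:
--             continue
--
--         for day in days:
--             if day in ['M', 'T', 'W', 'R', 'F']:
--                 if day not in day_groups:
--                     day_groups[day] = []
--                 day_groups[day].append((start_time, end_time))
--
--     # Check conflicts within each day
--     # For sorted intervals, checking adjacent pairs is sufficient and faster
--     for day, intervals in day_groups.items():
--         if len(intervals) < 2:
--             continue
--         # Sort by start time
--         intervals.sort(key=lambda x: x[0])
--         # Check adjacent intervals for overlap (sufficient for sorted intervals)
--         for i in range(len(intervals) - 1):
--             # Check if intervals overlap: start1 < end2 and end1 > start2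
--             # For sorted intervals, if i and i+1 don't overlap, i won't overlap with any j > i+1
--             if intervals[i][0] < intervals[i + 1][1] and intervals[i][1] > intervals[i + 1][0]:
--                 return True
--
--     return False
-- ===== SOURCE B (Python) =====
-- from typing import List, Dict
--
--
-- def time_to_minutes(time_str: str) -> int:
--     """Convert time string (HH:MM) to minutes since midnight."""
--     if not time_str:
--         return 0
--     parts = time_str.split(':')
--     if len(parts) != 2:
--         return 0
--     try:
--         return int(parts[0]) * 60 + int(parts[1])
--     except (ValueError, TypeError):
--         return 0
--
--
-- def check_schedule_conflicts_fast(schedule_times: List[Dict]) -> bool: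
--     """Conflict detection without the day-grouping dict: one filtered pass,
--     sort and adjacent zip scan per weekday."""
--     if len(schedule_times) < 2:
--         return False
--     for day in "MTWRF":
--         ivs = []
--         for info in schedule_times:
--             start = time_to_minutes(info.get("startTime", ""))
--             end = time_to_minutes(info.get("endTime", ""))
--             if not start or not end:
--                 continue
--             for c in info.get("days", "").replace(" ", ""):
--                 if c == day:
--                     ivs.append((start, end))
--         ivs.sort(key=lambda t: t[0])
--         if any(a < d and b > c for (a, b), (c, d) in zip(ivs, ivs[1:])):
--             return True
--     return False
-- ===== Notes on version B (the rewrite author's own statement) =====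
-- stated objective: simpler
-- what changed: B drops the day-grouping dictionary entirely: for each of the five weekday letters it makes one filtered pass collecting that day's intervals, sorts them, and detects overlap by zipping the sorted list with its tail, instead of A's build-dict-then-iterate-items with an index loop over adjacent positions.
import Mathlib
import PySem

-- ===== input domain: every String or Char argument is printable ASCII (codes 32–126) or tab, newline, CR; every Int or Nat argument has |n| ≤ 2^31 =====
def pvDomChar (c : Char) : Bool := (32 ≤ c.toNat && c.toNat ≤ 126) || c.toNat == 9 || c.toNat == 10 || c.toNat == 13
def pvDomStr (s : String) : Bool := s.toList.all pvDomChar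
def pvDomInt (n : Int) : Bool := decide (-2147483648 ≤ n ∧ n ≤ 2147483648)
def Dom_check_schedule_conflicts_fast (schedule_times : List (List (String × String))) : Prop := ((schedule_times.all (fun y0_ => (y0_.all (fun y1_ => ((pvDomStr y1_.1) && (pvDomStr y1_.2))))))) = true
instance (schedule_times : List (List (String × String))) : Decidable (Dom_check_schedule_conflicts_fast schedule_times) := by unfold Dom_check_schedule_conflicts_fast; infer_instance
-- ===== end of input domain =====

-- B replaces A's day-grouping dict by one filtered pass per weekday and the adjacent-pair index scan
-- by zipping the sorted list with its tail — objective: simpler; same return value proved below.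

-- shared helper: port of the module-level time_to_minutes (its _time_cache is pure memoisation, so it
-- is ported as the pure function); both Pythons share time_to_minutes, so both ports share this
def pv_tm (time_str : String) : Int :=
  if time_str = "" then 0
  else
    let parts := (PySem.Str.split? time_str ":").getD []   -- separator ":" ≠ "", so split? is `some`
    if parts.length ≠ 2 then 0
    else
      match PySem.Int.ofStr? (PySem.List.pyGetD parts 0 ""), PySem.Int.ofStr? (PySem.List.pyGetD parts 1 "") with
      | some h, some m => h * 60 + m
      | _, _ => 0

-- shared helper: Python's time_info.get(k, "") (both Pythons do this lookup identically)
def pv_get (info : List (String × String)) (k : String) : String :=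
  (PySem.Dict.ofList info).getD k ""

-- ===== PORT A =====
-- the `if day not in day_groups: day_groups[day] = []` + `.append(...)` pair is ported as
-- Dict.modify with default [] (identical dict semantics, including insertion order)
def check_schedule_conflicts_fast (schedule_times : List (List (String × String))) : Bool :=
  if schedule_times.length < 2 then false
  else
    let day_groups : PySem.Dict Char (List (Int × Int)) :=
      schedule_times.foldl (fun dg info =>
        let days := PySem.Str.replace (pv_get info "days") " " ""
        let start_time := pv_tm (pv_get info "startTime")
        let end_time := pv_tm (pv_get info "endTime")
        if start_time = 0 ∨ end_time = 0 then dg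
        else
          days.toList.foldl (fun dg day =>
            if day ∈ ['M', 'T', 'W', 'R', 'F'] then
              dg.modify day [] (fun l => l ++ [(start_time, end_time)])
            else dg) dg)
        PySem.Dict.empty
    day_groups.items.any (fun kv =>
      if kv.2.length < 2 then false
      else
        let intervals := PySem.List.sorted kv.2 (fun x => x.1) false
        (PySem.List.pyRange 0 ((intervals.length : Int) - 1) 1).any (fun i =>
          decide ((PySem.List.pyGetD intervals i (0, 0)).1 < (PySem.List.pyGetD intervals (i + 1) (0, 0)).2) &&
          decide ((PySem.List.pyGetD intervals i (0, 0)).2 > (PySem.List.pyGetD intervals (i + 1) (0, 0)).1)))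

-- ===== PORT B =====
def check_schedule_conflicts_fast_alt (schedule_times : List (List (String × String))) : Bool :=
  if schedule_times.length < 2 then false
  else
    "MTWRF".toList.any (fun day =>
      let ivs :=
        schedule_times.foldl (fun acc info =>
          let start := pv_tm (pv_get info "startTime")
          let «end» := pv_tm (pv_get info "endTime")
          if start = 0 ∨ «end» = 0 then acc
          else
            (PySem.Str.replace (pv_get info "days") " " "").toList.foldl
              (fun a c => if c = day then a ++ [(start, «end»)] else a) acc) []
      let ivs := PySem.List.sorted ivs (fun t => t.1) false
      (ivs.zip ivs.tail).any (fun p => decide (p.1.1 < p.2.2) && decide (p.1.2 > p.2.1)))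


-- ===== PRECONDITION & SPEC =====
def Spec_check_schedule_conflicts_fast (schedule_times : List (List (String × String))) (out : Bool) : Prop := out = check_schedule_conflicts_fast_alt schedule_times
instance (schedule_times : List (List (String × String))) (out : Bool) : Decidable (Spec_check_schedule_conflicts_fast schedule_times out) := by unfold Spec_check_schedule_conflicts_fast; infer_instance

-- ===== CLAIM (what is proved, stated in full; the proofs are below) =====
def Claim_equal_check_schedule_conflicts_fast : Prop := ∀ (schedule_times : List (List (String × String))), Dom_check_schedule_conflicts_fast schedule_times → Spec_check_schedule_conflicts_fast schedule_times (check_schedule_conflicts_fast schedule_times)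

-- ===== LEMMAS AND PROOFS =====

def pvEntry (info : List (String × String)) : List (Char × Int × Int) :=
  let start_time := pv_tm (pv_get info "startTime")
  let end_time := pv_tm (pv_get info "endTime")
  if start_time = 0 ∨ end_time = 0 then []
  else
    ((PySem.Str.replace (pv_get info "days") " " "").toList.filter
      (fun c => decide (c ∈ ['M', 'T', 'W', 'R', 'F']))).map (fun c => (c, start_time, end_time))
def pvPairs (st : List (List (String × String))) : List (Char × Int × Int) := st.flatMap pvEntry

theorem pvA_entry (info : List (String × String)) (d : PySem.Dict Char (List (Int × Int))) :
    (let days := PySem.Str.replace (pv_get info "days") " " ""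
     let start_time := pv_tm (pv_get info "startTime")
     let end_time := pv_tm (pv_get info "endTime")
     if start_time = 0 ∨ end_time = 0 then d
     else
       days.toList.foldl (fun dg day =>
         if day ∈ ['M', 'T', 'W', 'R', 'F'] then
           dg.modify day [] (fun l => l ++ [(start_time, end_time)])
         else dg) d)
    = (pvEntry info).foldl (fun d p => d.modify p.1 [] (fun l => l ++ [p.2])) d := by
  simp only [pvEntry]
  by_cases h : pv_tm (pv_get info "startTime") = 0 ∨ pv_tm (pv_get info "endTime") = 0
  · simp [h]
  · simp only [h, if_false]
    rw [List.foldl_map, List.foldl_filter]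
    have hfun : (fun (x : PySem.Dict Char (List (Int × Int))) (y : Char) =>
        if decide (y ∈ ['M', 'T', 'W', 'R', 'F']) = true then
          x.modify (y, pv_tm (pv_get info "startTime"), pv_tm (pv_get info "endTime")).1 []
            (fun l => l ++ [(y, pv_tm (pv_get info "startTime"), pv_tm (pv_get info "endTime")).2])
        else x)
        = (fun (dg : PySem.Dict Char (List (Int × Int))) (day : Char) =>
        if day ∈ ['M', 'T', 'W', 'R', 'F'] then
          dg.modify day [] (fun l => l ++ [(pv_tm (pv_get info "startTime"), pv_tm (pv_get info "endTime"))])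
        else dg) := by
      funext x y
      by_cases hy : y ∈ ['M', 'T', 'W', 'R', 'F'] <;> simp [hy]
    rw [hfun]

theorem pvA_fold_eq (st : List (List (String × String))) (d : PySem.Dict Char (List (Int × Int))) :
    st.foldl (fun dg info =>
        let days := PySem.Str.replace (pv_get info "days") " " ""
        let start_time := pv_tm (pv_get info "startTime")
        let end_time := pv_tm (pv_get info "endTime")
        if start_time = 0 ∨ end_time = 0 then dg
        else
          days.toList.foldl (fun dg day =>
            if day ∈ ['M', 'T', 'W', 'R', 'F'] then
              dg.modify day [] (fun l => l ++ [(start_time, end_time)])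
            else dg) dg) d
      = (pvPairs st).foldl (fun d p => d.modify p.1 [] (fun l => l ++ [p.2])) d := by
  induction st generalizing d with
  | nil => rfl
  | cons info t ih =>
      simp only [List.foldl_cons, pvPairs, List.flatMap_cons, List.foldl_append]
      rw [← pvA_entry info d, ih]
      rfl

def pvDayList (st : List (List (String × String))) (c : Char) : List (Int × Int) :=
  ((pvPairs st).filter (fun p => p.1 == c)).map (fun p => p.2)

theorem pvA_getD (st : List (List (String × String))) (c : Char) :
    ((pvPairs st).foldl (fun d p => d.modify p.1 [] (fun l => l ++ [p.2]))
        (PySem.Dict.empty : PySem.Dict Char (List (Int × Int)))).getD c []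
      = pvDayList st c := by
  rw [PySem.Dict.getD_foldl_modify_append]
  simp [pvDayList, PySem.Dict.getD_empty]

theorem pvPairs_fst_mem (st : List (List (String × String))) (p : Char × Int × Int)
    (hp : p ∈ pvPairs st) : p.1 ∈ ['M', 'T', 'W', 'R', 'F'] := by
  simp only [pvPairs, List.mem_flatMap] at hp
  obtain ⟨info, _, hp⟩ := hp
  simp only [pvEntry] at hp
  by_cases h : pv_tm (pv_get info "startTime") = 0 ∨ pv_tm (pv_get info "endTime") = 0
  · simp [h] at hp
  · simp only [h, if_false, List.mem_map, List.mem_filter] at hp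
    obtain ⟨cc, ⟨_, hmem⟩, rfl⟩ := hp
    simpa using hmem

theorem pvChars (day : Char) (hday : day ∈ ['M', 'T', 'W', 'R', 'F']) (st en : Int) :
    ∀ (cs : List Char) (acc : List (Int × Int)),
    cs.foldl (fun a c => if c = day then a ++ [(st, en)] else a) acc
      = acc ++ (((cs.filter (fun c => decide (c ∈ ['M', 'T', 'W', 'R', 'F']))).map
          (fun c => (c, st, en))).filter (fun p => p.1 == day)).map (fun p => p.2) := by
  intro cs
  induction cs with
  | nil => simp
  | cons c t ih =>
      intro acc
      by_cases hc : c = day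
      · subst hc
        have hcm : c ∈ ['M', 'T', 'W', 'R', 'F'] := hday
        simp only [List.foldl_cons, if_pos rfl, ih, List.filter_cons, hcm, decide_true,
          List.map_cons, beq_self_eq_true, if_pos, List.append_assoc, List.cons_append,
          List.nil_append]
      · by_cases hcm : c = 'M' ∨ c = 'T' ∨ c = 'W' ∨ c = 'R' ∨ c = 'F' <;>
          simp [List.foldl_cons, hc, ih, List.filter_cons, hcm, beq_iff_eq]

theorem pvB_entry (info : List (String × String)) (day : Char)
    (hday : day ∈ ['M', 'T', 'W', 'R', 'F']) (acc : List (Int × Int)) :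
    (if pv_tm (pv_get info "startTime") = 0 ∨ pv_tm (pv_get info "endTime") = 0 then acc
     else
       (PySem.Str.replace (pv_get info "days") " " "").toList.foldl
         (fun a c => if c = day then a ++ [(pv_tm (pv_get info "startTime"), pv_tm (pv_get info "endTime"))] else a) acc)
    = acc ++ ((pvEntry info).filter (fun p => p.1 == day)).map (fun p => p.2) := by
  simp only [pvEntry]
  by_cases h : pv_tm (pv_get info "startTime") = 0 ∨ pv_tm (pv_get info "endTime") = 0
  · simp [h]
  · simp only [h, if_false]
    exact pvChars day hday _ _ _ acc

theorem pvB_fold_eq (st : List (List (String × String))) (day : Char)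
    (hday : day ∈ ['M', 'T', 'W', 'R', 'F']) (acc : List (Int × Int)) :
    st.foldl (fun acc info =>
        let start := pv_tm (pv_get info "startTime")
        let «end» := pv_tm (pv_get info "endTime")
        if start = 0 ∨ «end» = 0 then acc
        else
          (PySem.Str.replace (pv_get info "days") " " "").toList.foldl
            (fun a c => if c = day then a ++ [(start, «end»)] else a) acc) acc
      = acc ++ pvDayList st day := by
  induction st generalizing acc with
  | nil => simp [pvDayList, pvPairs]
  | cons info t ih =>
      simp only [List.foldl_cons]
      rw [pvB_entry info day hday acc, ih]
      simp [pvDayList, pvPairs, List.append_assoc]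

theorem pvAdjNat (pred : (Int × Int) → (Int × Int) → Bool) :
    ∀ (l : List (Int × Int)),
      (List.range (l.length - 1)).any (fun i => pred (l.getD i (0, 0)) (l.getD (i + 1) (0, 0)))
        = (l.zip l.tail).any (fun p => pred p.1 p.2) := by
  intro l
  induction l with
  | nil => rfl
  | cons x t ih =>
      cases t with
      | nil => rfl
      | cons y u =>
          simp only [List.length_cons, Nat.add_sub_cancel, List.range_succ_eq_map,
            List.any_cons, List.any_map, List.tail_cons, List.zip_cons_cons]
          congr 1

def pvScanA (l : List (Int × Int)) : Bool :=
  if l.length < 2 then false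
  else
    (PySem.List.pyRange 0 (((PySem.List.sorted l (fun x => x.1) false).length : Int) - 1) 1).any (fun i =>
      decide ((PySem.List.pyGetD (PySem.List.sorted l (fun x => x.1) false) i (0, 0)).1 < (PySem.List.pyGetD (PySem.List.sorted l (fun x => x.1) false) (i + 1) (0, 0)).2) &&
      decide ((PySem.List.pyGetD (PySem.List.sorted l (fun x => x.1) false) i (0, 0)).2 > (PySem.List.pyGetD (PySem.List.sorted l (fun x => x.1) false) (i + 1) (0, 0)).1))

def pvScanB (l : List (Int × Int)) : Bool :=
  ((PySem.List.sorted l (fun t => t.1) false).zip (PySem.List.sorted l (fun t => t.1) false).tail).any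
    (fun p => decide (p.1.1 < p.2.2) && decide (p.1.2 > p.2.1))

theorem pvScan_eq (l : List (Int × Int)) : pvScanA l = pvScanB l := by
  unfold pvScanA pvScanB
  by_cases h : l.length < 2
  · rw [if_pos h]
    have hlen : (PySem.List.sorted l (fun t => t.1) false).length = l.length :=
      PySem.List.length_sorted l _ false
    match hs : PySem.List.sorted l (fun t => t.1) false with
    | [] => simp
    | [x] => simp
    | a :: b :: u =>
        rw [hs] at hlen
        simp only [List.length_cons] at hlen
        omega
  · rw [if_neg h]
    have hlen : (PySem.List.sorted l (fun x => x.1) false).length = l.length :=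
      PySem.List.length_sorted l _ false
    set s := PySem.List.sorted l (fun x => x.1) false with hsdef
    have h2 : 2 ≤ s.length := by omega
    have hcast : ((s.length : Int) - 1) = ((s.length - 1 : Nat) : Int) := by omega
    rw [hcast, PySem.List.pyRange_zero_natCast, List.any_map]
    rw [← pvAdjNat (fun a b => decide (a.1 < b.2) && decide (a.2 > b.1)) s]
    apply List.any_congr rfl
    intro i
    simp only [Function.comp]
    rw [PySem.List.pyGetD_natCast]
    have : ((i : Int) + 1) = ((i + 1 : Nat) : Int) := by push_cast; ring
    rw [this, PySem.List.pyGetD_natCast]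

theorem pvAny_congr_mem {α : Type} (l : List α) (p q : α → Bool)
    (h : ∀ x ∈ l, p x = q x) : l.any p = l.any q := by
  induction l with
  | nil => rfl
  | cons a t ih =>
      simp only [List.any_cons, h a (by simp)]
      rw [ih (fun x hx => h x (by simp [hx]))]

theorem pvKeys_any (K : List Char) (h : Char → Bool)
    (hsub : ∀ k ∈ K, k ∈ ['M', 'T', 'W', 'R', 'F'])
    (hfalse : ∀ d ∈ ['M', 'T', 'W', 'R', 'F'], d ∉ K → h d = false) :
    K.any h = (['M', 'T', 'W', 'R', 'F'] : List Char).any h := by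
  rw [Bool.eq_iff_iff]
  simp only [List.any_eq_true]
  constructor
  · rintro ⟨k, hk, hh⟩; exact ⟨k, hsub k hk, hh⟩
  · rintro ⟨d, hd, hh⟩
    by_cases hdK : d ∈ K
    · exact ⟨d, hdK, hh⟩
    · rw [hfalse d hd hdK] at hh; exact absurd hh (by simp)

def pvDict (st : List (List (String × String))) : PySem.Dict Char (List (Int × Int)) :=
  (pvPairs st).foldl (fun d p => d.modify p.1 [] (fun l => l ++ [p.2])) PySem.Dict.empty

theorem pvMain (st : List (List (String × String))) :
    check_schedule_conflicts_fast st = check_schedule_conflicts_fast_alt st := by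
  unfold check_schedule_conflicts_fast check_schedule_conflicts_fast_alt
  by_cases hlen : st.length < 2
  · rw [if_pos hlen, if_pos hlen]
  · rw [if_neg hlen, if_neg hlen]
    have hA : (st.foldl (fun dg info =>
        let days := PySem.Str.replace (pv_get info "days") " " ""
        let start_time := pv_tm (pv_get info "startTime")
        let end_time := pv_tm (pv_get info "endTime")
        if start_time = 0 ∨ end_time = 0 then dg
        else
          days.toList.foldl (fun dg day =>
            if day ∈ ['M', 'T', 'W', 'R', 'F'] then
              dg.modify day [] (fun l => l ++ [(start_time, end_time)])
            else dg) dg)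
        PySem.Dict.empty) = pvDict st := pvA_fold_eq st PySem.Dict.empty
    rw [hA]
    show ((pvDict st).items.any (fun kv => pvScanA kv.2))
        = ("MTWRF".toList.any (fun day =>
            pvScanB (st.foldl (fun acc info =>
              let start := pv_tm (pv_get info "startTime")
              let «end» := pv_tm (pv_get info "endTime")
              if start = 0 ∨ «end» = 0 then acc
              else
                (PySem.Str.replace (pv_get info "days") " " "").toList.foldl
                  (fun a c => if c = day then a ++ [(start, «end»)] else a) acc) [])))
    have hnodup : (pvDict st).keys.Nodup := by
      unfold pvDict
      exact PySem.Dict.nodup_keys_foldl_modify_key _ _ _ _ _ PySem.Dict.nodup_keys_empty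
    have hgetD : ∀ c, (pvDict st).getD c [] = pvDayList st c := fun c => pvA_getD st c
    have hsub : ∀ k ∈ (pvDict st).keys, k ∈ ['M', 'T', 'W', 'R', 'F'] := by
      intro k hk
      unfold pvDict at hk
      rw [PySem.Dict.keys_foldl_modify_key] at hk
      rcases (PySem.Set.mem_update _ _ _).1 hk with h1 | h1
      · simp [PySem.Dict.keys_empty] at h1
      · obtain ⟨p, hp, rfl⟩ := List.mem_map.1 h1
        exact pvPairs_fst_mem st p hp
    have hitems : (pvDict st).items
        = (pvDict st).keys.map (fun k => (k, (pvDict st).getD k [])) :=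
      PySem.Dict.items_eq_map_keys _ hnodup []
    rw [hitems, List.any_map]
    show ((pvDict st).keys.any (fun k => pvScanA ((pvDict st).getD k []))) = _
    rw [pvKeys_any ((pvDict st).keys) (fun k => pvScanA ((pvDict st).getD k [])) hsub ?hfalse]
    case hfalse =>
      intro d _ hdK
      show pvScanA ((pvDict st).getD d []) = false
      have hc : (pvDict st).contains d = false := by
        rcases Bool.eq_false_or_eq_true ((pvDict st).contains d) with h1 | h1
        · exact absurd ((PySem.Dict.contains_iff_mem_keys _ _).1 h1) hdK
        · exact h1
      rw [PySem.Dict.getD_of_not_contains _ _ hc]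
      rfl
    have hMT : "MTWRF".toList = ['M', 'T', 'W', 'R', 'F'] := rfl
    rw [hMT]
    apply pvAny_congr_mem
    intro d hd
    rw [hgetD d, pvScan_eq]
    rw [pvB_fold_eq st d hd []]
    simp

-- ===== VERDICT (by name: the statement is the Claim_ definition above) =====
theorem check_schedule_conflicts_fast_spec : Claim_equal_check_schedule_conflicts_fast := by
  intro st _
  unfold Spec_check_schedule_conflicts_fast
  exact pvMain st
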